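-- pv_equiv track=rewrite | github.com/phr-nk/Python-functions | Recursion Functions.py | Rfilter
-- ===== SOURCE A (Python) =====
-- def Rfilter(lst, n):
--     '''This function takes as input a list and a number n and returns a new list with every element except for n'''
--     if lst == []:
--         return []
--     else:
--         temp = Rfilter(lst[:-1],n)
--         if lst[-1] != n: #if the first element is not equal to the input
--             temp += [lst[-1]] #add a list of just that element to the end of temp
--         return temp
-- ===== SOURCE B (Python) =====
-- def Rfilter(lst, n):
--     '''Iterative re-implementation: one forward pass with an accumulator.'''
--     result = []
--     for x in lst:
--         if x != n:
--             result.append(x)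
--     return result
-- ===== Notes on version B (the rewrite author's own statement) =====
-- stated objective: simpler
-- what changed: Replaces the back-to-front recursion over lst[:-1] (which rebuilds a prefix list at each step) by a single iterative forward pass appending each non-matching element to an accumulator.
import Mathlib
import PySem

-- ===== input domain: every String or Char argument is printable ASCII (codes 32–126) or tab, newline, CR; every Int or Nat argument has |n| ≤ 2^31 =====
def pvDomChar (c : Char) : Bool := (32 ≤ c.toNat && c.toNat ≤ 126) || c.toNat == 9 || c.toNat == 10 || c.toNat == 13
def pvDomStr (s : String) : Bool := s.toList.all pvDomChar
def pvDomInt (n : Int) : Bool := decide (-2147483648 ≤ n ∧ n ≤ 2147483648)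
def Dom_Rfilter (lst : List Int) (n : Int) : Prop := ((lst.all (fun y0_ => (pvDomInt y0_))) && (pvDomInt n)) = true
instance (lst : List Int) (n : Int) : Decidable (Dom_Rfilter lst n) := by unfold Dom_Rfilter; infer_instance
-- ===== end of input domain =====

-- ===== PORT A =====
-- B: single forward pass with an accumulator instead of A's recursion over lst[:-1] (simpler, linear).
-- A: 'if lst == []: return []' else recurse on lst[:-1], then append lst[-1] if it differs from n.
def Rfilter (lst : List Int) (n : Int) : List Int :=
  if lst = [] then []
  else
    let temp := Rfilter lst.dropLast n
    match (PySem.List.pyGet? lst (-1)) with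
    | some last => if last ≠ n then temp ++ [last] else temp
    | none => temp
termination_by lst.length
decreasing_by
  rename_i h
  cases lst with
  | nil => exact absurd rfl h
  | cons a as => simp [List.length_dropLast]

-- ===== PORT B =====
-- B: for x in lst: if x != n: result.append(x)
def Rfilter_alt (lst : List Int) (n : Int) : List Int :=
  lst.foldl (fun result x => if x ≠ n then result ++ [x] else result) []

-- ===== PRECONDITION & SPEC =====
def Spec_Rfilter (lst : List Int) (n : Int) (out : List Int) : Prop := out = Rfilter_alt lst n
instance (lst : List Int) (n : Int) (out : List Int) : Decidable (Spec_Rfilter lst n out) := by unfold Spec_Rfilter; infer_instance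

-- ===== CLAIM (what is proved, stated in full; the proofs are below) =====
def Claim_equal_Rfilter : Prop := ∀ (lst : List Int) (n : Int), Dom_Rfilter lst n → Spec_Rfilter lst n (Rfilter lst n)

-- ===== LEMMAS AND PROOFS =====

-- ===== VERDICT (by name: the statement is the Claim_ definition above) =====
theorem Rfilter_eq (lst : List Int) (n : Int) : Rfilter lst n = Rfilter_alt lst n := by
  induction lst using List.reverseRecOn with
  | nil => rw [Rfilter.eq_def]; simp [Rfilter_alt]
  | append_singleton xs x ih =>
    rw [Rfilter.eq_def]
    have hne : xs ++ [x] ≠ [] := by simp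
    simp only [hne, if_false]
    have hget : PySem.List.pyGet? (xs ++ [x]) (-1) = some x := by
      simp [PySem.List.pyGet?, PySem.List.pyIdx?]
    rw [hget]
    simp only [List.dropLast_concat, ih]
    unfold Rfilter_alt
    rw [List.foldl_append]
    simp only [List.foldl]

theorem Rfilter_spec : Claim_equal_Rfilter := by
  intro lst n _
  unfold Spec_Rfilter
  exact Rfilter_eq lst n
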